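-- pv_equiv track=rewrite | github.com/suman1252/Python | claculate_series_sum.py | calculate_series_sum
-- ===== SOURCE A (Python) =====
-- def calculate_series_sum(n):
--     series_sum = 0
--     current_term = 0
--     series_str = ""
--
--     for i in range(n):
--         current_term = current_term * 10 + 2
--         series_sum += current_term
--         series_str += str(current_term)
--         if i < n - 1:
--             series_str += "+"
--
--     return series_sum, series_str
-- ===== SOURCE B (Python) =====
-- def calculate_series_sum(n):
--     series_str = "+".join("2" * k for k in range(1, n + 1))
--     if n <= 0:
--         return 0, series_str
--     series_sum = 2 * (10 ** (n + 1) - 9 * n - 10) // 81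
--     return series_sum, series_str
-- ===== Notes on version B (the rewrite author's own statement) =====
-- stated objective: alternative
-- what changed: Replaces the running term/sum/string accumulator loop by building each term directly as the repeated-digit string '2'*k joined with '+', and computing the numeric sum by the closed form 2*(10**(n+1)-9*n-10)//81 instead of the recurrence.
import Mathlib
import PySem

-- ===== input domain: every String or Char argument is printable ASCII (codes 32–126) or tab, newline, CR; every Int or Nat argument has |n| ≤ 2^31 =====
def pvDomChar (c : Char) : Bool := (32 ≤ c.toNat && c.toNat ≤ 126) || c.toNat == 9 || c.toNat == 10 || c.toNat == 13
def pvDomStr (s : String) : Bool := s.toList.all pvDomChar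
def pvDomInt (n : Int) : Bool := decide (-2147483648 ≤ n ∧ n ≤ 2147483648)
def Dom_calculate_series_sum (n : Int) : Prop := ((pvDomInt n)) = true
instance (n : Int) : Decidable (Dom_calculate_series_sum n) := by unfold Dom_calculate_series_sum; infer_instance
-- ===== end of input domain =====

-- B replaces A's running term/sum/string accumulator loop by '+'-joining repeated-digit strings '2'*k
-- and a closed-form sum 2*(10^(n+1)-9n-10)//81 (alternative decomposition; equal return values proved).


-- ===== PORT A =====
def calculate_series_sum (n : Int) : Int × String :=
  let r := (PySem.List.pyRange 0 n 1).foldl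
    (fun (st : Int × Int × String) (i : Int) =>
      let current_term := st.2.1 * 10 + 2
      let series_sum := st.1 + current_term
      let series_str := st.2.2 ++ PySem.Int.toStr current_term
      let series_str := if i < n - 1 then series_str ++ "+" else series_str
      (series_sum, current_term, series_str))
    (0, 0, "")
  (r.1, r.2.2)

-- ===== PORT B =====
-- "2" * k ported as replicate k.toNat '2' (exact: Python's s*k is "" for k ≤ 0); here k ranges over 1..n.
def calculate_series_sum_alt (n : Int) : Int × String :=
  let series_str := PySem.Str.join "+"
    ((PySem.List.pyRange 1 (n + 1) 1).map (fun k => String.ofList (List.replicate k.toNat '2')))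
  if n ≤ 0 then (0, series_str)
  -- 10 ** (n+1) ported with a Nat exponent: this branch is only reached for n ≥ 1, where it is exact.
  else (PySem.Int.floordiv (2 * (10 ^ (n + 1).toNat - 9 * n - 10)) 81, series_str)

-- ===== PRECONDITION & SPEC =====
def Spec_calculate_series_sum (n : Int) (out : Int × String) : Prop := out = calculate_series_sum_alt n
instance (n : Int) (out : Int × String) : Decidable (Spec_calculate_series_sum n out) := by unfold Spec_calculate_series_sum; infer_instance

-- ===== CLAIM (what is proved, stated in full; the proofs are below) =====
def Claim_equal_calculate_series_sum : Prop := ∀ (n : Int), Dom_calculate_series_sum n → Spec_calculate_series_sum n (calculate_series_sum n)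

-- ===== LEMMAS AND PROOFS =====

-- the k-th term 2, 22, 222, … of A's recurrence, as a Nat
def pvR : Nat → Nat
  | 0 => 0
  | k + 1 => pvR k * 10 + 2

-- A's running sum after m iterations
def pvS : Nat → Int
  | 0 => 0
  | m + 1 => pvS m + ((pvR (m + 1) : Nat) : Int)

-- A's string accumulator after m non-final iterations: each term followed by '+'
def pvL (m : Nat) : List Char :=
  (List.range m).flatMap (fun k => List.replicate (k + 1) '2' ++ ['+'])

lemma pvR_pos (k : Nat) : 0 < pvR (k + 1) := by
  simp only [pvR]; omega

lemma toDigitsCore_succ (b f n : Nat) (acc : List Char) :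
    Nat.toDigitsCore b (f + 1) n acc =
      if n / b = 0 then (n % b).digitChar :: acc
      else Nat.toDigitsCore b f (n / b) ((n % b).digitChar :: acc) := rfl

lemma toDigitsCore_append (b f : Nat) :
    ∀ (n : Nat) (acc ext : List Char),
      Nat.toDigitsCore b f n (acc ++ ext) = Nat.toDigitsCore b f n acc ++ ext := by
  induction f with
  | zero => intro n acc ext; rfl
  | succ f ih =>
    intro n acc ext
    rw [toDigitsCore_succ, toDigitsCore_succ]
    by_cases h : n / b = 0
    · rw [if_pos h, if_pos h, List.cons_append]
    · rw [if_neg h, if_neg h, ← List.cons_append, ih]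

lemma toDigitsCore_fuel (b : Nat) (hb : 2 ≤ b) :
    ∀ (n : Nat), ∀ (f f' : Nat) (acc : List Char), n < f → n < f' →
      Nat.toDigitsCore b f n acc = Nat.toDigitsCore b f' n acc := by
  intro n
  induction n using Nat.strong_induction_on with
  | _ n ih =>
    intro f f' acc hf hf'
    obtain ⟨g, rfl⟩ : ∃ g, f = g + 1 := ⟨f - 1, by omega⟩
    obtain ⟨g', rfl⟩ : ∃ g', f' = g' + 1 := ⟨f' - 1, by omega⟩
    rw [toDigitsCore_succ, toDigitsCore_succ]
    by_cases h : n / b = 0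
    · rw [if_pos h, if_pos h]
    · rw [if_neg h, if_neg h]
      have hn0 : 0 < n := Nat.pos_of_ne_zero (fun e => h (by simp [e]))
      have hlt : n / b < n := Nat.div_lt_self hn0 (by omega)
      exact ih (n / b) hlt g g' _ (by omega) (by omega)

lemma toDigits_step (n d : Nat) (hn : 0 < n) (hd : d < 10) :
    Nat.toDigits 10 (10 * n + d) = Nat.toDigits 10 n ++ [Nat.digitChar d] := by
  have hmod : (10 * n + d) % 10 = d := by omega
  have hdiv : (10 * n + d) / 10 = n := by omega
  unfold Nat.toDigits
  rw [toDigitsCore_succ, hmod, hdiv, if_neg hn.ne',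
    toDigitsCore_fuel 10 (by norm_num) n (10 * n + d) (n + 1) _ (by omega) (by omega)]
  have h := toDigitsCore_append 10 (n + 1) n [] [Nat.digitChar d]
  rw [List.nil_append] at h
  exact h

lemma toDigits_pvR : ∀ (k : Nat), Nat.toDigits 10 (pvR (k + 1)) = List.replicate (k + 1) '2' := by
  intro k
  induction k with
  | zero => rfl
  | succ k ih =>
    have h1 : pvR (k + 2) = 10 * pvR (k + 1) + 2 := by simp only [pvR]; ring
    rw [h1, toDigits_step _ 2 (pvR_pos k) (by norm_num), ih,
      show Nat.digitChar 2 = '2' from rfl, ← List.replicate_succ']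

lemma toChars_pvR (k : Nat) :
    PySem.Int.toChars ((pvR (k + 1) : Nat) : Int) = List.replicate (k + 1) '2' := by
  unfold PySem.Int.toChars
  rw [if_neg (not_lt.mpr (Int.natCast_nonneg _)), Int.toNat_natCast]
  exact toDigits_pvR k

lemma pvR_step (m : Nat) : ((pvR m : Nat) : Int) * 10 + 2 = ((pvR (m + 1) : Nat) : Int) := by
  simp only [pvR]; push_cast; ring

lemma pvL_step (m : Nat) :
    pvL m ++ (List.replicate (m + 1) '2' ++ ['+']) = pvL (m + 1) := by
  simp [pvL, List.range_succ]

lemma str_step (m : Nat) :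
    String.ofList (pvL m) ++ PySem.Int.toStr ((pvR (m + 1) : Nat) : Int) ++ "+"
      = String.ofList (pvL (m + 1)) := by
  apply String.toList_inj.mp
  simp only [String.toList_append, String.toList_ofList, PySem.Int.toList_toStr, toChars_pvR]
  rw [show ("+" : String).toList = ['+'] from rfl, List.append_assoc, pvL_step]

-- A's loop state after the first m iterations, m strictly before the last index
lemma loopA (N : Int) (m : Nat) (hm : (m : Int) ≤ N - 1) :
    (PySem.List.pyRange 0 (m : Int) 1).foldl
      (fun (st : Int × Int × String) (i : Int) =>
        let current_term := st.2.1 * 10 + 2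
        let series_sum := st.1 + current_term
        let series_str := st.2.2 ++ PySem.Int.toStr current_term
        let series_str := if i < N - 1 then series_str ++ "+" else series_str
        (series_sum, current_term, series_str))
      (0, 0, "")
    = (pvS m, ((pvR m : Nat) : Int), String.ofList (pvL m)) := by
  induction m with
  | zero =>
    have h0 : PySem.List.pyRange 0 ((0 : Nat) : Int) 1 = [] := by decide
    rw [h0]
    rfl
  | succ m ih =>
    have hcast : ((m + 1 : Nat) : Int) = ((m : Int)) + 1 := by push_cast; ring
    rw [hcast, PySem.List.pyRange_one_succ_right (by omega), List.foldl_append,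
      ih (by omega)]
    simp only [List.foldl_cons, List.foldl_nil]
    rw [if_pos (show (m : Int) < N - 1 by omega), pvR_step, str_step]
    rfl

-- B's term list: pyRange 1 (m+1) as mapped naturals
lemma pyRange_one_map (m : Nat) :
    PySem.List.pyRange 1 ((m : Int) + 1) 1
      = (List.range m).map (fun k => ((k : Nat) : Int) + 1) := by
  induction m with
  | zero => decide
  | succ m ih =>
    have hcast : ((m + 1 : Nat) : Int) + 1 = ((m : Int) + 1) + 1 := by push_cast; ring
    rw [hcast, PySem.List.pyRange_one_succ_right (by omega), ih, List.range_succ]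
    simp

-- '+'-join over the explicit repeated-digit terms, front induction on range'
lemma join_terms (m : Nat) : ∀ (s : Nat),
    PySem.Chars.join ['+'] ((List.range' s (m + 1)).map (fun k => List.replicate (k + 1) '2'))
      = ((List.range' s m).flatMap (fun k => List.replicate (k + 1) '2' ++ ['+']))
        ++ List.replicate (s + m + 1) '2' := by
  induction m with
  | zero =>
    intro s
    simp [List.range', PySem.Chars.join_singleton]
  | succ m ih =>
    intro s
    have e1 : List.range' s (m + 1 + 1) = s :: List.range' (s + 1) (m + 1) := List.range'_succ
    have e2 : List.range' s (m + 1) = s :: List.range' (s + 1) m := List.range'_succ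
    have htl : (List.range' (s + 1) (m + 1)).map (fun k => List.replicate (k + 1) '2')
        = List.replicate (s + 1 + 1) '2'
          :: (List.range' (s + 1 + 1) m).map (fun k => List.replicate (k + 1) '2') := by
      rw [show List.range' (s + 1) (m + 1) = (s + 1) :: List.range' (s + 1 + 1) m from
        List.range'_succ]
      rfl
    rw [e1, e2, List.map_cons, htl, PySem.Chars.join_cons_cons, ← htl, ih (s + 1),
      List.flatMap_cons]
    rw [show s + 1 + m + 1 = s + (m + 1) + 1 by ring]
    simp [List.append_assoc]

lemma pvR_lin (k : Nat) : 9 * ((pvR k : Nat) : Int) = 2 * 10 ^ k - 2 := by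
  induction k with
  | zero => simp [pvR]
  | succ k ih =>
    rw [← pvR_step, pow_succ]
    linarith

lemma pvS_closed (m : Nat) : 81 * pvS m = 2 * 10 ^ (m + 1) - 18 * (m : Int) - 20 := by
  induction m with
  | zero => simp [pvS]
  | succ m ih =>
    have h9 := pvR_lin (m + 1)
    simp only [pvS]
    rw [show (10 : Int) ^ (m + 1 + 1) = 10 ^ (m + 1) * 10 from pow_succ 10 (m + 1)]
    push_cast
    linarith

-- ===== VERDICT (by name: the statement is the Claim_ definition above) =====
theorem calculate_series_sum_spec : Claim_equal_calculate_series_sum := by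
  unfold Claim_equal_calculate_series_sum Spec_calculate_series_sum
  intro n _
  by_cases hn : n ≤ 0
  · -- both ranges are empty
    have h1 : PySem.List.pyRange 0 n 1 = [] := by simp [PySem.List.pyRange]; omega
    have h2 : PySem.List.pyRange 1 (n + 1) 1 = [] := by simp [PySem.List.pyRange]; omega
    simp [calculate_series_sum, calculate_series_sum_alt, h1, h2, hn, PySem.Str.join,
      PySem.Chars.join_nil]
  · -- n ≥ 1; write n = m + 1
    rw [not_le] at hn
    obtain ⟨m, rfl⟩ : ∃ m : Nat, n = (m : Int) + 1 := ⟨(n - 1).toNat, by omega⟩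
    have hA : calculate_series_sum ((m : Int) + 1)
        = (pvS (m + 1), String.ofList (pvL m ++ List.replicate (m + 1) '2')) := by
      unfold calculate_series_sum
      rw [PySem.List.pyRange_one_succ_right (by omega), List.foldl_append,
        loopA ((m : Int) + 1) m (by omega)]
      simp only [List.foldl_cons, List.foldl_nil]
      rw [if_neg (show ¬ ((m : Int) < (m : Int) + 1 - 1) by omega), pvR_step]
      refine Prod.ext rfl ?_
      apply String.toList_inj.mp
      simp [PySem.Int.toList_toStr, toChars_pvR]
    have hB : calculate_series_sum_alt ((m : Int) + 1)
        = (pvS (m + 1), String.ofList (pvL m ++ List.replicate (m + 1) '2')) := by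
      unfold calculate_series_sum_alt
      rw [if_neg (show ¬ ((m : Int) + 1 ≤ 0) by omega)]
      refine Prod.ext ?_ ?_
      · show PySem.Int.floordiv
            (2 * (10 ^ (((m : Int) + 1) + 1).toNat - 9 * ((m : Int) + 1) - 10)) 81
          = pvS (m + 1)
        rw [show (((m : Int) + 1) + 1).toNat = m + 2 by omega]
        have hval : 2 * ((10 : Int) ^ (m + 2) - 9 * ((m : Int) + 1) - 10)
            = 81 * pvS (m + 1) := by
          have hc := pvS_closed (m + 1)
          push_cast at hc ⊢
          linarith
        rw [hval, PySem.Int.floordiv_eq_ediv_of_pos (by norm_num),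
          Int.mul_ediv_cancel_left _ (by norm_num)]
      · show PySem.Str.join "+"
            ((PySem.List.pyRange 1 (((m : Int) + 1) + 1) 1).map
              (fun k => String.ofList (List.replicate k.toNat '2')))
          = String.ofList (pvL m ++ List.replicate (m + 1) '2')
        apply String.toList_inj.mp
        rw [show (((m : Int) + 1) + 1) = ((m + 1 : Nat) : Int) + 1 by push_cast; ring,
          pyRange_one_map (m + 1), PySem.Str.toList_join,
          show ("+" : String).toList = ['+'] from rfl]
        simp only [List.map_map]
        have hmap : (List.range (m + 1)).map
            (String.toList ∘ ((fun k : Int => String.ofList (List.replicate k.toNat '2'))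
              ∘ (fun k : Nat => ((k : Nat) : Int) + 1)))
            = (List.range (m + 1)).map (fun k => List.replicate (k + 1) '2') := by
          apply List.map_congr_left
          intro k _
          have hk : ((k : Int) + 1).toNat = k + 1 := by omega
          simp [Function.comp, hk]
        rw [hmap, List.range_eq_range', join_terms m 0]
        simp [pvL, List.range_eq_range']
    rw [hA, hB]
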